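-- pv_equiv track=rewrite | github.com/SergioTallo/adventofcode2023 | day_11/day_11.py | expand_universe
-- ===== SOURCE A (Python) =====
-- def expand_universe(universe: list) -> tuple:
--     list_expand_y = []
--     list_expand_x = []
--     for i in range(len(universe)):
--         if '#' not in universe[i]:
--             list_expand_y.append(i)
--     for i in range(len(universe[0])):
--         if '#' not in [row[i] for row in universe]:
--             list_expand_x.append(i)
--     return list_expand_y, list_expand_x
-- ===== SOURCE B (Python) =====
-- def expand_universe(universe: list) -> tuple:
--     list_expand_y = []
--     occupied_cols = set()
--     for i, row in enumerate(universe):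
--         empty = True
--         for j, ch in enumerate(row):
--             if ch == '#':
--                 occupied_cols.add(j)
--                 empty = False
--         if empty:
--             list_expand_y.append(i)
--     list_expand_x = [j for j in range(len(universe[0])) if j not in occupied_cols]
--     return (list_expand_y, list_expand_x)
-- ===== Notes on version B (the rewrite author's own statement) =====
-- stated objective: alternative
-- what changed: Replaces A's per-column transpose-and-scan (a fresh column list built and searched for each column index) with a single row-wise pass that records empty-row indices and a set of occupied column indices, then lists the unoccupied columns of range(len(universe[0])).
import Mathlib
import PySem

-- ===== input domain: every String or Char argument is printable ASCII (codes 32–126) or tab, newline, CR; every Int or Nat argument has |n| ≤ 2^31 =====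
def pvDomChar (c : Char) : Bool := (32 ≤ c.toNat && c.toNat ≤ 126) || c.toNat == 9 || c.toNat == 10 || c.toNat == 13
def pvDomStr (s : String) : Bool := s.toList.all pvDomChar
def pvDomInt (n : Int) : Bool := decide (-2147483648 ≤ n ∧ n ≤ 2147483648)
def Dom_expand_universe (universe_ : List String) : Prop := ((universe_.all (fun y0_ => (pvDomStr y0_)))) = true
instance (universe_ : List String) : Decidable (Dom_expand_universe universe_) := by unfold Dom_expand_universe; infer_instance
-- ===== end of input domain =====

-- B replaces A's per-column transpose-and-scan with one row-wise pass that collects the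
-- occupied-column set; equivalence is proved on non-empty universes whose rows are at
-- least as long as row 0 (elsewhere A raises IndexError).

-- ===== PORT A =====
def expand_universe (universe_ : List String) : List Int × List Int :=
  let list_expand_y : List Int :=
    (PySem.List.pyRange 0 (PySem.List.len universe_) 1).foldl
      (fun acc i =>
        if PySem.Str.isIn "#" (PySem.List.pyGetD universe_ i "") then acc else acc ++ [i]) []
  let list_expand_x : List Int :=
    (PySem.List.pyRange 0 (PySem.Str.len (PySem.List.pyGetD universe_ 0 "")) 1).foldl
      (fun acc i =>
        if '#' ∈ universe_.map (fun row => PySem.List.pyGetD row.toList i ' ')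
        then acc else acc ++ [i]) []
  (list_expand_y, list_expand_x)

-- ===== PORT B =====
-- inner loop of B: scan one row, adding occupied column indices, tracking emptiness
def pvB_inner (occ : PySem.Set Int) (row : List Char) : PySem.Set Int × Bool :=
  (PySem.List.enumerate row).foldl
    (fun st2 q => if q.2 = '#' then (PySem.Set.add st2.1 q.1, false) else st2) (occ, true)

-- outer loop body of B: one enumerated row
def pvB_outer (st : List Int × PySem.Set Int) (p : Int × String) : List Int × PySem.Set Int :=
  let inner := pvB_inner st.2 p.2.toList
  (if inner.2 then st.1 ++ [p.1] else st.1, inner.1)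

def expand_universe_alt (universe_ : List String) : List Int × List Int :=
  let st := (PySem.List.enumerate universe_).foldl pvB_outer ([], PySem.Set.empty)
  (st.1,
   (PySem.List.pyRange 0 (PySem.Str.len (PySem.List.pyGetD universe_ 0 "")) 1).filter
     (fun j => !(PySem.Set.contains st.2 j)))

-- ===== PRECONDITION & SPEC =====
-- Pre_ excludes exactly the inputs where Python A raises IndexError: the empty list
-- (universe[0]) and ragged inputs with a row shorter than row 0 (row[i] in the comprehension).
def Pre_expand_universe (universe_ : List String) : Prop :=
  universe_ ≠ [] ∧ ∀ s ∈ universe_, (universe_.headD "").toList.length ≤ s.toList.length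
instance (universe_ : List String) : Decidable (Pre_expand_universe universe_) := by
  unfold Pre_expand_universe; infer_instance
def pvWitness_expand_universe : List String := ["#.", "..", ".#"]

def Spec_expand_universe (universe_ : List String) (out : List Int × List Int) : Prop :=
  out = expand_universe_alt universe_
instance (universe_ : List String) (out : List Int × List Int) :
    Decidable (Spec_expand_universe universe_ out) := by
  unfold Spec_expand_universe; infer_instance

-- ===== CLAIM (what is proved, stated in full; the proofs are below) =====
def Claim_equal_expand_universe : Prop :=
  ∀ (universe_ : List String), Dom_expand_universe universe_ →
    Pre_expand_universe universe_ →
    Spec_expand_universe universe_ (expand_universe universe_)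

-- ===== LEMMAS AND PROOFS =====

-- Python's '#' in s for the single character '#'
theorem isIn_hash (s : String) :
    PySem.Str.isIn "#" s = decide ('#' ∈ s.toList) := by
  by_cases h : '#' ∈ s.toList <;>
    simp [h, PySem.Chars.isIn_iff_infix, PySem.Chars.isIn_eq_false_iff,
      List.singleton_infix_iff]

theorem inner_snd (row : List Char) : ∀ (s : Int) (occ : PySem.Set Int) (b : Bool),
    ((PySem.List.enumerate row s).foldl
      (fun st2 q => if q.2 = '#' then (PySem.Set.add st2.1 q.1, false) else st2) (occ, b)).2
    = (b && !(decide ('#' ∈ row))) := by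
  induction row with
  | nil => intro s occ b; simp [PySem.List.enumerate_nil]
  | cons c cs ih =>
    intro s occ b
    rw [PySem.List.enumerate_cons]
    by_cases hc : c = '#'
    · simp [hc, List.foldl_cons, ih]
    · simp [hc, List.foldl_cons, ih, Ne.symm hc]

theorem inner_fst_mem (row : List Char) : ∀ (s : Int) (occ : PySem.Set Int) (b : Bool) (j : Int),
    (j ∈ ((PySem.List.enumerate row s).foldl
      (fun st2 q => if q.2 = '#' then (PySem.Set.add st2.1 q.1, false) else st2) (occ, b)).1)
    ↔ (j ∈ occ ∨ ∃ k : Nat, row[k]? = some '#' ∧ j = s + k) := by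
  induction row with
  | nil => intro s occ b j; simp [PySem.List.enumerate_nil]
  | cons c cs ih =>
    intro s occ b j
    rw [PySem.List.enumerate_cons]
    by_cases hc : c = '#'
    · subst hc
      simp only [List.foldl_cons, ih, ite_true]
      simp only [PySem.Set.mem_add]
      constructor
      · rintro (⟨h | h⟩ | ⟨k, hr, hj⟩)
        · exact Or.inl h
        · exact Or.inr ⟨0, by simp, by simpa using h⟩
        · exact Or.inr ⟨k + 1, by simpa using hr, by push_cast at hj ⊢; omega⟩
      · rintro (h | ⟨k, hr, hj⟩)
        · exact Or.inl (Or.inl h)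
        · cases k with
          | zero => exact Or.inl (Or.inr (by simpa using hj))
          | succ k' =>
            exact Or.inr ⟨k', by simpa using hr, by push_cast at hj ⊢; omega⟩
    · simp only [List.foldl_cons, if_neg hc, ih]
      constructor
      · rintro (h | ⟨k, hr, hj⟩)
        · exact Or.inl h
        · exact Or.inr ⟨k + 1, by simpa using hr, by push_cast at hj ⊢; omega⟩
      · rintro (h | ⟨k, hr, hj⟩)
        · exact Or.inl h
        · cases k with
          | zero => exact absurd (by simpa using hr) hc
          | succ k' =>
            exact Or.inr ⟨k', by simpa using hr, by push_cast at hj ⊢; omega⟩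

theorem pvB_inner_snd (occ : PySem.Set Int) (row : List Char) :
    (pvB_inner occ row).2 = !(decide ('#' ∈ row)) := by
  unfold pvB_inner; rw [inner_snd]; simp

theorem pvB_inner_mem (occ : PySem.Set Int) (row : List Char) (j : Int) :
    j ∈ (pvB_inner occ row).1 ↔
      j ∈ occ ∨ ∃ k : Nat, row[k]? = some '#' ∧ j = (k : Int) := by
  unfold pvB_inner; rw [inner_fst_mem]; simp

theorem outer_fst (u : List String) : ∀ (s : Int) (ys : List Int) (occ : PySem.Set Int),
    ((PySem.List.enumerate u s).foldl pvB_outer (ys, occ)).1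
    = ys ++ ((PySem.List.enumerate u s).filter
        (fun p => !(decide ('#' ∈ p.2.toList)))).map (·.1) := by
  induction u with
  | nil => intro s ys occ; simp [PySem.List.enumerate_nil]
  | cons r rs ih =>
    intro s ys occ
    rw [PySem.List.enumerate_cons]
    simp only [List.foldl_cons, List.filter_cons]
    by_cases h : '#' ∈ r.toList
    · simp only [pvB_outer, pvB_inner_snd, h, decide_true, Bool.not_true, ih]
      simp
    · simp only [pvB_outer, pvB_inner_snd, h, decide_false, Bool.not_false, if_true, ih]
      simp

theorem outer_snd_mem (u : List String) : ∀ (s : Int) (ys : List Int) (occ : PySem.Set Int) (j : Int),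
    (j ∈ ((PySem.List.enumerate u s).foldl pvB_outer (ys, occ)).2)
    ↔ (j ∈ occ ∨ ∃ r ∈ u, ∃ k : Nat, r.toList[k]? = some '#' ∧ j = (k : Int)) := by
  induction u with
  | nil => intro s ys occ j; simp [PySem.List.enumerate_nil]
  | cons r rs ih =>
    intro s ys occ j
    rw [PySem.List.enumerate_cons]
    simp only [List.foldl_cons, pvB_outer, ih, pvB_inner_mem, List.mem_cons]
    constructor
    · rintro (⟨h | ⟨k, hr, hj⟩⟩ | ⟨r', hr', hx⟩)
      · exact Or.inl h
      · exact Or.inr ⟨r, Or.inl rfl, k, hr, hj⟩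
      · exact Or.inr ⟨r', Or.inr hr', hx⟩
    · rintro (h | ⟨r', hr' | hr', hx⟩)
      · exact Or.inl (Or.inl h)
      · exact Or.inl (Or.inr (hr' ▸ hx))
      · exact Or.inr ⟨r', hr', hx⟩

-- A's ys-loop as a filter over the enumeration
theorem A_ys_eq (u : List String) :
    (PySem.List.pyRange 0 (PySem.List.len u) 1).foldl
      (fun acc i =>
        if PySem.Str.isIn "#" (PySem.List.pyGetD u i "") then acc else acc ++ [i]) []
    = ((PySem.List.enumerate u).filter (fun p => !(decide ('#' ∈ p.2.toList)))).map (·.1) := by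
  have he := PySem.List.enumerate_eq_map_pyRange u ""
  rw [he, List.filter_map, List.map_map]
  rw [PySem.List.foldl_congr_mem _
    (fun acc i => if PySem.Str.isIn "#" (PySem.List.pyGetD u i "") then acc else acc ++ [i])
    (fun acc i =>
      if (fun i => !(decide ('#' ∈ (PySem.List.pyGetD u i "").toList))) i = true
      then acc ++ [i] else acc) []
    (by
      intro acc x hx
      simp only [isIn_hash]
      by_cases h : '#' ∈ (PySem.List.pyGetD u x "").toList <;> simp [h])]
  rw [PySem.List.foldl_append_if]
  have h1 : ((fun (x : Int × String) => x.1) ∘ fun j => (j, PySem.List.pyGetD u j "")) = fun j : Int => j := rfl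
  have h2 : ((fun (p : Int × String) => !decide ('#' ∈ p.2.toList)) ∘ fun j => (j, PySem.List.pyGetD u j ""))
      = fun i : Int => !decide ('#' ∈ (PySem.List.pyGetD u i "").toList) := rfl
  rw [h1, h2]
  simp

-- A's xs-loop as a filter over the range
theorem A_xs_eq (u : List String) (m : Int) :
    (PySem.List.pyRange 0 m 1).foldl
      (fun acc i =>
        if '#' ∈ u.map (fun row => PySem.List.pyGetD row.toList i ' ')
        then acc else acc ++ [i]) []
    = (PySem.List.pyRange 0 m 1).filter
        (fun i => !(decide ('#' ∈ u.map (fun row => PySem.List.pyGetD row.toList i ' ')))) := by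
  rw [PySem.List.foldl_congr_mem _ _
    (fun acc i =>
      if (fun i => !(decide ('#' ∈ u.map (fun row => PySem.List.pyGetD row.toList i ' ')))) i = true
      then acc ++ [(fun i : Int => i) i] else acc) []
    (by
      intro acc x hx
      by_cases h : '#' ∈ u.map (fun row => PySem.List.pyGetD row.toList x ' ') <;> simp [h])]
  rw [PySem.List.foldl_append_if]
  simp

-- ===== VERDICT (by name: the statement is the Claim_ definition above) =====
theorem expand_universe_spec : Claim_equal_expand_universe := by
  intro u _hdom hpre
  obtain ⟨hne, hlen⟩ := hpre
  unfold Spec_expand_universe expand_universe expand_universe_alt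
  have hocc := outer_snd_mem u 0 [] PySem.Set.empty
  refine Prod.ext ?_ ?_
  · -- first components
    show _ = ((PySem.List.enumerate u).foldl pvB_outer ([], PySem.Set.empty)).1
    rw [outer_fst, A_ys_eq]
    simp
  · -- second components
    show _ = (PySem.List.pyRange 0 (PySem.Str.len (PySem.List.pyGetD u 0 "")) 1).filter
      (fun j => !(PySem.Set.contains ((PySem.List.enumerate u).foldl pvB_outer ([], PySem.Set.empty)).2 j))
    rw [A_xs_eq]
    apply List.filter_congr
    intro i hi
    rw [PySem.List.mem_pyRange_one] at hi
    have hm : PySem.Str.len (PySem.List.pyGetD u 0 "") = ((u.headD "").toList.length : Int) := by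
      cases u with
      | nil => exact absurd rfl hne
      | cons h t => simp [PySem.List.pyGetD_zero_cons]
    rw [hm] at hi
    congr 1
    rw [Bool.eq_iff_iff]
    simp only [decide_eq_true_eq, PySem.Set.contains_iff]
    rw [hocc i]
    simp only [PySem.Set.empty, List.not_mem_nil, false_or]
    constructor
    · -- '#' in column i → i occupied
      intro h
      rw [List.mem_map] at h
      obtain ⟨r, hr, hval⟩ := h
      have hlr : i < (r.toList.length : Int) := lt_of_lt_of_le hi.2 (by exact_mod_cast hlen r hr)
      rw [PySem.List.pyGetD_eq_getElem _ _ hi.1 (by simpa using hlr)] at hval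
      exact ⟨r, hr, i.toNat, by rw [List.getElem?_eq_getElem (by omega)]; exact congrArg some hval, by omega⟩
    · -- i occupied → '#' in column i  (needs i < m; occupied beyond m is filtered by range)
      rintro ⟨r, hr, k, hval, hj⟩
      rw [List.mem_map]
      refine ⟨r, hr, ?_⟩
      have hk : k < r.toList.length := (List.getElem?_eq_some_iff.mp hval).1
      rw [PySem.List.pyGetD_eq_getElem _ _ (by omega : (0:Int) ≤ i) (by exact_mod_cast (by omega : (i : Int) < (r.toList.length : Int)))]
      have hik : i.toNat = k := by omega
      have h2 : r.toList[i.toNat]? = some '#' := by rw [hik]; exact hval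
      obtain ⟨h3, h4⟩ := List.getElem?_eq_some_iff.mp h2
      exact h4
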